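-- pv_equiv track=rewrite | github.com/sammyshakes/comic-book-maker | StoryGeneratorAgent/tools/IdentifyCharactersTool.py | parse_non_json_response
-- ===== SOURCE A (Python) =====
-- def parse_non_json_response(content):
--     characters = {}
--     lines = content.split('\n')
--     current_character = None
--     current_description = []
--
--     for line in lines:
--         if ':' in line and not current_character:
--             parts = line.split(':', 1)
--             current_character = parts[0].strip()
--             current_description = [parts[1].strip()]
--         elif current_character:
--             if line.strip():
--                 current_description.append(line.strip())
--             else:
--                 characters[current_character] = ' '.join(current_description)
--                 current_character = None
--                 current_description = []
--
--     if current_character: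
--         characters[current_character] = ' '.join(current_description)
--
--     return characters
-- ===== SOURCE B (Python) =====
-- def parse_non_json_response(content):
--     characters = {}
--     # Phase 1: group lines into blocks separated by blank (whitespace-only) lines.
--     blocks = []
--     block = []
--     for line in content.split('\n'):
--         if line.strip():
--             block.append(line)
--         else:
--             blocks.append(block)
--             block = []
--     blocks.append(block)
--     # Phase 2: in each block, the first 'Name: text' line (non-empty stripped name)
--     # starts the entry; the rest of the block continues the description.
--     for block in blocks:
--         for i, line in enumerate(block):
--             if ':' in line:
--                 key, rest = line.split(':', 1)
--                 name = key.strip()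
--                 if name:
--                     characters[name] = ' '.join([rest.strip()] + [l.strip() for l in block[i + 1:]])
--                     break
--     return characters
-- ===== Notes on version B (the rewrite author's own statement) =====
-- stated objective: alternative
-- what changed: Replaces A's line-by-line state machine (current_character/current_description mutated across iterations) by a two-phase decomposition: first group the lines into blank-separated blocks, then extract from each block its first colon line with a non-blank key and the block's remaining lines as one entry.
import Mathlib
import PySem

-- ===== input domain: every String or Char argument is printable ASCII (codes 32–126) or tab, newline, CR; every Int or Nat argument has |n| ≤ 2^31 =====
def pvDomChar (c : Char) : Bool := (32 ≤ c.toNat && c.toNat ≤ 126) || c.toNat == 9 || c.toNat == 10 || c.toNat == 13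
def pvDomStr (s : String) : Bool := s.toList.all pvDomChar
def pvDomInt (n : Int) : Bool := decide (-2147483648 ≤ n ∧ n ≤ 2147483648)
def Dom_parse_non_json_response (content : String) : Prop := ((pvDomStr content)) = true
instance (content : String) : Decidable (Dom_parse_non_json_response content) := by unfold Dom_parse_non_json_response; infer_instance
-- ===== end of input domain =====

-- B replaces A's three-variable line-by-line state machine by a two-phase decomposition
-- (group lines into blank-separated blocks, then extract one entry per block); objective: alternative.

-- ===== PORT A =====
-- Python truthiness of `current_character`: None and '' are falsy.
def pvTruthyA (cc : Option String) : Bool :=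
  match cc with
  | none => false
  | some s => s != ""

-- A's for-loop over the lines; the trailing `if current_character:` flush is the [] case.
-- parts[0]/parts[1] are pyGetD with default "": ':' ∈ line guarantees both exist, so this is exact.
def parse_non_json_response_loop (chars : PySem.Dict String String)
    (cc : Option String) (desc : List String) : List String → PySem.Dict String String
  | [] =>
      if pvTruthyA cc then chars.insert (cc.getD "") (PySem.Str.join " " desc) else chars
  | line :: ls =>
      if PySem.Str.isIn ":" line && !pvTruthyA cc then
        let parts := (PySem.Str.splitMax? line ":" 1).getD []
        parse_non_json_response_loop chars (some (PySem.Str.strip (PySem.List.pyGetD parts 0 "")))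
          [PySem.Str.strip (PySem.List.pyGetD parts 1 "")] ls
      else if pvTruthyA cc then
        if PySem.Str.strip line != "" then
          parse_non_json_response_loop chars cc (desc ++ [PySem.Str.strip line]) ls
        else
          parse_non_json_response_loop (chars.insert (cc.getD "") (PySem.Str.join " " desc)) none [] ls
      else
        parse_non_json_response_loop chars cc desc ls

def parse_non_json_response (content : String) : List (String × String) :=
  (parse_non_json_response_loop PySem.Dict.empty none []
    ((PySem.Str.split? content "\n").getD [])).items

-- ===== PORT B =====
-- Phase 2 inner loop of B: scan a block for the first colon line with a non-empty stripped
-- key; the break with block[i+1:] is the recursion stopping with the remaining lines `rest`.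
def parse_alt_flush (chars : PySem.Dict String String) : List String → PySem.Dict String String
  | [] => chars
  | line :: rest =>
      if PySem.Str.isIn ":" line then
        let parts := (PySem.Str.splitMax? line ":" 1).getD []
        let name := PySem.Str.strip (PySem.List.pyGetD parts 0 "")
        if name != "" then
          chars.insert name (PySem.Str.join " "
            (PySem.Str.strip (PySem.List.pyGetD parts 1 "") :: rest.map PySem.Str.strip))
        else parse_alt_flush chars rest
      else parse_alt_flush chars rest

def parse_non_json_response_alt (content : String) : List (String × String) :=
  let g := ((PySem.Str.split? content "\n").getD []).foldl
    (fun acc line =>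
      if PySem.Str.strip line != "" then (acc.1, acc.2 ++ [line])
      else (acc.1 ++ [acc.2], ([] : List String)))
    (([] : List (List String)), ([] : List String))
  let blocks := g.1 ++ [g.2]
  (blocks.foldl parse_alt_flush PySem.Dict.empty).items

-- ===== PRECONDITION & SPEC =====
def Spec_parse_non_json_response (content : String) (out : List (String × String)) : Prop := out = parse_non_json_response_alt content
instance (content : String) (out : List (String × String)) : Decidable (Spec_parse_non_json_response content out) := by unfold Spec_parse_non_json_response; infer_instance

-- ===== CLAIM (what is proved, stated in full; the proofs are below) =====
def Claim_equal_parse_non_json_response : Prop := ∀ (content : String), Dom_parse_non_json_response content → Spec_parse_non_json_response content (parse_non_json_response content)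

-- ===== LEMMAS AND PROOFS =====

def pvNonblank (l : String) : Bool := PySem.Str.strip l != ""

-- the blank-separated segments of a line list (segments may be empty, like str.split)
def pvSplitBlank : List String → List (List String)
  | [] => [[]]
  | x :: xs =>
      match pvSplitBlank xs with
      | b :: bs => if pvNonblank x then (x :: b) :: bs else [] :: b :: bs
      | [] => [[]]

def pvRest (xs : List String) : List (List String) :=
  match xs.dropWhile pvNonblank with
  | [] => []
  | _ :: r => pvSplitBlank r

def pvConsFirst (cur : List String) : List (List String) → List (List String)
  | [] => [cur]
  | b :: bs => (cur ++ b) :: bs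

theorem pvSplitBlank_ne_nil (xs : List String) : pvSplitBlank xs ≠ [] := by
  cases xs with
  | nil => simp [pvSplitBlank]
  | cons x xs =>
      simp only [pvSplitBlank]
      split
      · split <;> simp
      · simp

theorem pvSplitBlank_eq (xs : List String) :
    pvSplitBlank xs = xs.takeWhile pvNonblank :: pvRest xs := by
  induction xs with
  | nil => simp [pvSplitBlank, pvRest]
  | cons x xs ih =>
      rw [show pvSplitBlank (x :: xs) = (match pvSplitBlank xs with
          | b :: bs => if pvNonblank x then (x :: b) :: bs else [] :: b :: bs
          | [] => [[]]) from rfl, ih]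
      by_cases h : pvNonblank x = true
      · simp [h, pvRest]
      · have h' : pvNonblank x = false := by simpa using h
        simp only [h', Bool.false_eq_true, if_false, List.takeWhile_cons]
        rw [show pvRest (x :: xs) = (match List.dropWhile pvNonblank (x :: xs) with
            | [] => [] | _ :: r => pvSplitBlank r) from rfl]
        simp [h', ih]

theorem pvSplitBlank_cons_nonblank {l : String} {ls : List String} (h : pvNonblank l = true) :
    pvSplitBlank (l :: ls) = (l :: ls.takeWhile pvNonblank) :: pvRest ls := by
  rw [show pvSplitBlank (l :: ls) = match pvSplitBlank ls with
      | b :: bs => if pvNonblank l then (l :: b) :: bs else [] :: b :: bs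
      | [] => [[]] from rfl, pvSplitBlank_eq ls]
  simp [h]

theorem pvSplitBlank_cons_blank {l : String} {ls : List String} (h : pvNonblank l = false) :
    pvSplitBlank (l :: ls) = [] :: pvSplitBlank ls := by
  rw [show pvSplitBlank (l :: ls) = match pvSplitBlank ls with
      | b :: bs => if pvNonblank l then (l :: b) :: bs else [] :: b :: bs
      | [] => [[]] from rfl, pvSplitBlank_eq ls]
  simp [h, ← pvSplitBlank_eq]

theorem pvSplitBlank_cons_nonblank' {l : String} {ls : List String} {b : List String}
    {bs : List (List String)} (h : pvNonblank l = true) (hsb : pvSplitBlank ls = b :: bs) :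
    pvSplitBlank (l :: ls) = (l :: b) :: bs := by
  have h2 := (pvSplitBlank_eq ls).symm.trans hsb
  injection h2 with hA hB
  rw [pvSplitBlank_cons_nonblank h, hA, hB]

-- a line containing ':' cannot be whitespace-only
theorem pvColon_nonblank (l : String) (h : PySem.Str.isIn ":" l = true) : pvNonblank l = true := by
  have hmem : ':' ∈ l.toList := by
    have := (PySem.Str.isIn_iff_infix ":" l).mp h
    rcases this with ⟨s, t, hst⟩
    simp only [show (":" : String).toList = [':'] from rfl] at hst
    rw [← hst]; simp
  by_contra hb
  have hstrip : PySem.Str.strip l = "" := by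
    simpa [pvNonblank, bne_iff_ne, not_not] using hb
  have hchars : PySem.Chars.strip l.toList = [] := by
    have := congrArg String.toList hstrip
    simpa using this
  have hex : ∀ x ∈ List.dropWhile PySem.Chars.isspace l.toList, PySem.Chars.isspace x = true := by
    have h1 : List.dropWhile PySem.Chars.isspace
        ((List.dropWhile PySem.Chars.isspace l.toList).reverse) = [] := by
      have : PySem.Chars.strip l.toList =
          (List.dropWhile PySem.Chars.isspace
            ((List.dropWhile PySem.Chars.isspace l.toList).reverse)).reverse := by
        simp [PySem.Chars.strip, PySem.Chars.lstrip, PySem.Chars.rstrip]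
      rw [this] at hchars
      simpa using hchars
    intro x hx
    exact (List.dropWhile_eq_nil_iff.mp h1) x (List.mem_reverse.mpr hx)
  have hcolon_mem : ':' ∈ List.dropWhile PySem.Chars.isspace l.toList := by
    have hsplit := List.takeWhile_append_dropWhile (p := PySem.Chars.isspace) (l := l.toList)
    rw [← hsplit] at hmem
    rcases List.mem_append.mp hmem with h1 | h2
    · have := List.mem_takeWhile_imp h1
      simp [PySem.Chars.isspace] at this
    · exact h2
  have := hex ':' hcolon_mem
  simp [PySem.Chars.isspace] at this

-- the grouping fold of B builds exactly pvSplitBlank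
theorem pvGroup_eq (lines : List String) : ∀ (done : List (List String)) (cur : List String),
    (lines.foldl
        (fun acc line =>
          if PySem.Str.strip line != "" then (acc.1, acc.2 ++ [line])
          else (acc.1 ++ [acc.2], ([] : List String)))
        (done, cur)).1 ++
      [(lines.foldl
        (fun acc line =>
          if PySem.Str.strip line != "" then (acc.1, acc.2 ++ [line])
          else (acc.1 ++ [acc.2], ([] : List String)))
        (done, cur)).2] = done ++ pvConsFirst cur (pvSplitBlank lines) := by
  induction lines with
  | nil => intro done cur; simp [pvSplitBlank, pvConsFirst]
  | cons l ls ih =>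
      intro done cur
      rcases hsb : pvSplitBlank ls with _ | ⟨b, bs⟩
      · exact absurd hsb (pvSplitBlank_ne_nil ls)
      by_cases h : (PySem.Str.strip l != "") = true
      · simp only [List.foldl_cons, h, if_true]
        rw [ih done (cur ++ [l]), hsb,
          pvSplitBlank_cons_nonblank' (by simpa [pvNonblank] using h) hsb]
        simp [pvConsFirst]
      · have hb : pvNonblank l = false := by simpa [pvNonblank] using h
        have h' : (PySem.Str.strip l != "") = false := by simpa [pvNonblank] using h
        simp only [List.foldl_cons, h', Bool.false_eq_true, if_false]
        rw [ih (done ++ [cur]) [], pvSplitBlank_cons_blank hb, hsb]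
        simp [pvConsFirst]

-- A's loop in "active" mode consumes the rest of the current block, then flushes
theorem pvLoopActive (ls : List String) : ∀ (chars : PySem.Dict String String) (k : String)
    (desc : List String), (k != "") = true →
    parse_non_json_response_loop chars (some k) desc ls =
      (match ls.dropWhile pvNonblank with
       | [] => chars.insert k
           (PySem.Str.join " " (desc ++ (ls.takeWhile pvNonblank).map PySem.Str.strip))
       | _ :: r => parse_non_json_response_loop
           (chars.insert k
             (PySem.Str.join " " (desc ++ (ls.takeWhile pvNonblank).map PySem.Str.strip)))
           none [] r) := by
  induction ls with
  | nil =>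
      intro chars k desc hk
      simp [parse_non_json_response_loop, pvTruthyA, hk]
  | cons l ls ih =>
      intro chars k desc hk
      by_cases hb : pvNonblank l = true
      · have hnb : (PySem.Str.strip l != "") = true := by simpa [pvNonblank] using hb
        simp only [parse_non_json_response_loop, pvTruthyA, hk, Bool.not_true,
          Bool.and_false, Bool.false_eq_true, if_false, if_true, hnb]
        rw [ih chars k (desc ++ [PySem.Str.strip l]) hk]
        simp [hb]
      · have hbl : (PySem.Str.strip l != "") = false := by simpa [pvNonblank] using hb
        simp only [parse_non_json_response_loop, pvTruthyA, hk, Bool.not_true,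
          Bool.and_false, Bool.false_eq_true, if_false, if_true, hbl]
        simp [hb]

-- A's loop in "search" mode (cc falsy) equals B's fold of flushes over the blocks
theorem pvLoopSearch : ∀ (n : Nat) (ls : List String), ls.length ≤ n →
    ∀ (chars : PySem.Dict String String) (cc : Option String) (desc : List String),
    pvTruthyA cc = false →
    parse_non_json_response_loop chars cc desc ls =
      (pvSplitBlank ls).foldl parse_alt_flush chars := by
  intro n
  induction n with
  | zero =>
      intro ls hlen chars cc desc hcc
      have : ls = [] := List.eq_nil_of_length_eq_zero (Nat.le_zero.mp hlen)
      subst this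
      simp [parse_non_json_response_loop, pvSplitBlank, parse_alt_flush, hcc]
  | succ n ih =>
      intro ls hlen chars cc desc hcc
      cases ls with
      | nil => simp [parse_non_json_response_loop, pvSplitBlank, parse_alt_flush, hcc]
      | cons l ls =>
          have hlen' : ls.length ≤ n := by simpa using Nat.lt_succ_iff.mp (by simpa using hlen)
          by_cases hcol : PySem.Str.isIn ":" l = true
          · have hnbl := pvColon_nonblank l hcol
            rcases hsb : pvSplitBlank ls with _ | ⟨b, bs⟩
            · exact absurd hsb (pvSplitBlank_ne_nil ls)
            set parts := (PySem.Str.splitMax? l ":" 1).getD [] with hparts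
            set name := PySem.Str.strip (PySem.List.pyGetD parts 0 "") with hname
            by_cases hn : (name != "") = true
            · -- a colon line with a non-empty key starts an entry
              have hcolc : PySem.Chars.isIn [':'] l.toList = true := by simpa using hcol
              simp only [parse_non_json_response_loop, hcol, hcc, Bool.not_false,
                Bool.and_true, if_true]
              rw [pvLoopActive ls chars name [PySem.Str.strip (PySem.List.pyGetD parts 1 "")] hn]
              rw [pvSplitBlank_cons_nonblank hnbl]
              simp only [List.foldl_cons]
              rw [show parse_alt_flush chars (l :: ls.takeWhile pvNonblank) =
                  chars.insert name (PySem.Str.join " "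
                    (PySem.Str.strip (PySem.List.pyGetD parts 1 "")
                      :: (ls.takeWhile pvNonblank).map PySem.Str.strip)) by
                simp [parse_alt_flush, hcolc, ← hparts, ← hname, hn]]
              split
              next heq =>
                simp [pvRest, heq]
              next x r heq =>
                have hr : r.length ≤ n := by
                  have h1 : (ls.dropWhile pvNonblank).length ≤ ls.length :=
                    List.length_dropWhile_le _ _
                  rw [heq] at h1
                  simp at h1
                  omega
                rw [ih r hr _ none [] rfl]
                simp [pvRest, heq]
            · -- empty name before ':' — A stays falsy, B's flush skips the line
              simp only [parse_non_json_response_loop, hcol, hcc, Bool.not_false,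
                Bool.and_true, if_true]
              rw [ih ls hlen' chars (some name) [PySem.Str.strip (PySem.List.pyGetD parts 1 "")]
                (by simpa [pvTruthyA] using hn)]
              rw [pvSplitBlank_cons_nonblank' hnbl hsb]
              simp only [List.foldl_cons]
              rw [show parse_alt_flush chars (l :: b) = parse_alt_flush chars b by
                simp [parse_alt_flush, show PySem.Chars.isIn [':'] l.toList = true by
                  simpa using hcol, ← hparts, ← hname, hn]]
              rw [hsb, List.foldl_cons]
          · -- no ':' in the line: A skips it in search mode
            have hcol' : PySem.Str.isIn ":" l = false := by simpa using hcol
            simp only [parse_non_json_response_loop, hcol', hcc, Bool.false_and,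
              Bool.false_eq_true, if_false]
            rw [ih ls hlen' chars cc desc hcc]
            by_cases hb : pvNonblank l = true
            · rcases hsb : pvSplitBlank ls with _ | ⟨b, bs⟩
              · exact absurd hsb (pvSplitBlank_ne_nil ls)
              rw [pvSplitBlank_cons_nonblank' hb hsb]
              simp only [List.foldl_cons]
              rw [show parse_alt_flush chars (l :: b) = parse_alt_flush chars b by
                simp [parse_alt_flush, show PySem.Chars.isIn [':'] l.toList = false by
                  simpa using hcol']]
            · have hb' : pvNonblank l = false := by simpa using hb
              rw [pvSplitBlank_cons_blank hb']
              simp [parse_alt_flush]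

-- ===== VERDICT (by name: the statement is the Claim_ definition above) =====
theorem parse_non_json_response_spec : Claim_equal_parse_non_json_response := by
  unfold Claim_equal_parse_non_json_response
  intro content _
  unfold Spec_parse_non_json_response parse_non_json_response parse_non_json_response_alt
  rw [pvLoopSearch ((PySem.Str.split? content "\n").getD []).length _ (le_refl _) _ none [] rfl]
  have hg := pvGroup_eq ((PySem.Str.split? content "\n").getD []) [] []
  simp only [List.nil_append] at hg
  show (List.foldl parse_alt_flush PySem.Dict.empty
      (pvSplitBlank ((PySem.Str.split? content "\n").getD []))).items =
    (List.foldl parse_alt_flush PySem.Dict.empty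
      ((List.foldl
          (fun acc line =>
            if PySem.Str.strip line != "" then (acc.1, acc.2 ++ [line])
            else (acc.1 ++ [acc.2], ([] : List String)))
          (([] : List (List String)), ([] : List String))
          ((PySem.Str.split? content "\n").getD [])).1 ++
       [(List.foldl
          (fun acc line =>
            if PySem.Str.strip line != "" then (acc.1, acc.2 ++ [line])
            else (acc.1 ++ [acc.2], ([] : List String)))
          (([] : List (List String)), ([] : List String))
          ((PySem.Str.split? content "\n").getD [])).2])).items
  rw [hg]
  rcases hsb : pvSplitBlank ((PySem.Str.split? content "\n").getD []) with _ | ⟨b, bs⟩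
  · exact absurd hsb (pvSplitBlank_ne_nil _)
  simp [pvConsFirst]
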